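-- pv_equiv track=rewrite | github.com/lroy-stack/ai-pod-store | podclaw/pricing_utils.py | _round_to_engagement
-- ===== SOURCE A (Python) =====
-- _ENDINGS: list[tuple[int, list[int]]] = [
--     (2000, [99]),             # < EUR 20: .99 only
--     (5000, [99]),             # EUR 20-49: .99 (standard retail: €24.99, €29.99, €39.99)
--     (10000, [0, 50, 95, 99]),  # EUR 50-99: .00, .50, .95, .99
-- ]
--
-- _ENDINGS_HIGH: list[int] = [0, 50]  # EUR 100+: .00, .50
--
-- def _valid_endings(price_cents: int) -> list[int]:
--     """Return valid cent endings for the given price range."""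
--     for threshold, endings in _ENDINGS:
--         if price_cents < threshold:
--             return endings
--     return _ENDINGS_HIGH
--
-- def _round_to_engagement(price_cents: int) -> int:
--     """Round price UP to the nearest valid engagement ending. Never rounds down."""
--     euros = price_cents // 100
--     remainder = price_cents % 100
--     endings = _valid_endings(price_cents)
--
--     # Try current euro amount first — find the smallest ending >= remainder
--     for ending in sorted(endings):
--         if ending >= remainder:
--             candidate = euros * 100 + ending
--             if candidate >= price_cents:
--                 return candidate
--
--     # No ending fits in current euro — bump to next euro
--     next_euros = euros + 1
--     next_price = next_euros * 100
--     next_endings = _valid_endings(next_price)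
--     return next_euros * 100 + min(next_endings)
-- ===== SOURCE B (Python) =====
-- _ENDINGS = [
--     (2000, [99]),
--     (5000, [99]),
--     (10000, [0, 50, 95, 99]),
-- ]
--
-- _ENDINGS_HIGH = [0, 50]
--
-- def _valid_endings(price_cents):
--     for threshold, endings in _ENDINGS:
--         if price_cents < threshold:
--             return endings
--     return _ENDINGS_HIGH
--
-- def _round_to_engagement(price_cents):
--     """Round price UP to the nearest valid engagement ending, by generating
--     every candidate at the current and the next euro level and taking the
--     smallest one that is >= price_cents."""
--     euros = price_cents // 100
--     next_level = (euros + 1) * 100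
--     candidates = [euros * 100 + e for e in _valid_endings(price_cents)]
--     candidates += [next_level + e for e in _valid_endings(next_level)]
--     return min(c for c in candidates if c >= price_cents)
-- ===== Notes on version B (the rewrite author's own statement) =====
-- stated objective: simpler
-- what changed: A's early-return scan over sorted endings followed by a separate bump-to-next-euro fallback is replaced by generating all candidates at the current and next euro level and returning the minimum candidate >= price_cents.
import Mathlib
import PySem

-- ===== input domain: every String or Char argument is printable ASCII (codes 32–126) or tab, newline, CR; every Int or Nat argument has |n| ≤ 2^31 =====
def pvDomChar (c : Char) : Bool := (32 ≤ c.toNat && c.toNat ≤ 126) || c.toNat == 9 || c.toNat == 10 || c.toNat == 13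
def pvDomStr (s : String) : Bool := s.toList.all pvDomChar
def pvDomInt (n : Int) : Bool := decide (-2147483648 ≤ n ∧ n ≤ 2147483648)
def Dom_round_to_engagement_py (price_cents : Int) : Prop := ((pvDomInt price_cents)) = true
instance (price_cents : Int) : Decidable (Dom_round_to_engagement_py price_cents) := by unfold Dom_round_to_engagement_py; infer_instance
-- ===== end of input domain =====

-- B changes decomposition: instead of A's early-return scan then bump-to-next-euro,
-- B generates every candidate at the current and next euro level and takes the
-- minimum candidate ≥ price_cents (objective: simpler control flow, one pass).

-- ===== PORT A =====
-- shared helper: Python _valid_endings (the for-loop over _ENDINGS with early return)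
def valid_endings (price_cents : Int) : List Int :=
  if price_cents < 2000 then [99]
  else if price_cents < 5000 then [99]
  else if price_cents < 10000 then [0, 50, 95, 99]
  else [0, 50]

-- the 'for ending in sorted(endings): if ending >= remainder and candidate >= price: return'
def roundLoopA (price_cents euros remainder : Int) : List Int → Option Int
  | [] => none
  | e :: rest =>
    if e ≥ remainder then
      let candidate := euros * 100 + e
      if candidate ≥ price_cents then some candidate
      else roundLoopA price_cents euros remainder rest
    else roundLoopA price_cents euros remainder rest

def round_to_engagement_py (price_cents : Int) : Int :=
  let euros := PySem.Int.floordiv price_cents 100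
  let remainder := PySem.Int.mod price_cents 100
  let endings := valid_endings price_cents
  match roundLoopA price_cents euros remainder (PySem.List.sorted endings (fun x => x) false) with
  | some v => v
  | none =>
    let next_euros := euros + 1
    let next_endings := valid_endings (next_euros * 100)
    next_euros * 100 +
      (match PySem.List.min? next_endings (fun x => x) with
       | some m => m
       | none => 0)  -- unreachable: valid_endings never returns []

-- ===== PORT B =====
def round_to_engagement_py_alt (price_cents : Int) : Int :=
  let euros := PySem.Int.floordiv price_cents 100
  let next_level := (euros + 1) * 100
  let candidates :=
    (valid_endings price_cents).map (fun e => euros * 100 + e) ++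
    (valid_endings next_level).map (fun e => next_level + e)
  match PySem.List.min? (candidates.filter (fun c => price_cents ≤ c)) (fun x => x) with
  | some v => v
  | none => 0  -- unreachable: the next-level candidates always exceed price_cents

-- ===== PRECONDITION & SPEC =====
def Spec_round_to_engagement_py (price_cents : Int) (out : Int) : Prop := out = round_to_engagement_py_alt price_cents
instance (price_cents : Int) (out : Int) : Decidable (Spec_round_to_engagement_py price_cents out) := by unfold Spec_round_to_engagement_py; infer_instance

-- ===== CLAIM (what is proved, stated in full; the proofs are below) =====
def Claim_equal_round_to_engagement_py : Prop := ∀ (price_cents : Int), Dom_round_to_engagement_py price_cents → Spec_round_to_engagement_py price_cents (round_to_engagement_py price_cents)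

-- ===== LEMMAS AND PROOFS =====

-- ===== VERDICT (by name: the statement is the Claim_ definition above) =====
-- the two threshold show-rewrites and ending lists differ per euro region, so the
-- equivalence is proved region by region on q = price // 100, r = price % 100
lemma regions_eq (q r : Int) (hr0 : 0 ≤ r) (hr1 : r < 100) :
    round_to_engagement_py (100*q+r) = round_to_engagement_py_alt (100*q+r) := by
  have hq : PySem.Int.floordiv (100*q+r) 100 = q := by
    rw [PySem.Int.floordiv_eq_ediv_of_pos (by norm_num)]; omega
  have hm : PySem.Int.mod (100*q+r) 100 = r := by
    rw [PySem.Int.mod_eq_emod_of_pos (by norm_num)]; omega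
  unfold round_to_engagement_py round_to_engagement_py_alt valid_endings
  rw [hq, hm]
  rcases (by omega : q ≤ 18 ∨ q = 19 ∨ (20 ≤ q ∧ q ≤ 48) ∨ q = 49 ∨ (50 ≤ q ∧ q ≤ 98) ∨ q = 99 ∨ 100 ≤ q) with h|h|h|h|h|h|h
  · -- q ≤ 18 : endings [99] at both levels
    simp only [show (100*q+r < 2000) = True from by simp; omega,
      show ((q+1)*100 < 2000) = True from by simp; omega, ite_true,
      show PySem.List.sorted [(99:Int)] (fun x => x) false = [99] from by decide,
      roundLoopA, List.map, List.cons_append, List.nil_append,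
      List.filter_cons, List.filter_nil, ge_iff_le, decide_eq_true_eq,
      show (r ≤ (99:Int)) = True from by simp; omega,
      show ((100*q+r ≤ q*100+99)) = True from by simp; omega,
      show ((100*q+r ≤ (q+1)*100+99)) = True from by simp; omega, ite_true,
      PySem.List.min?_id_cons, List.foldl]
    omega
  · -- q = 19 : endings [99], next level 2000 still [99]
    simp only [show (100*q+r < 2000) = True from by simp; omega,
      show ((q+1)*100 < 2000) = False from by simp; omega,
      show ((q+1)*100 < 5000) = True from by simp; omega, ite_true, ite_false,
      show PySem.List.sorted [(99:Int)] (fun x => x) false = [99] from by decide,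
      roundLoopA, List.map, List.cons_append, List.nil_append,
      List.filter_cons, List.filter_nil, ge_iff_le, decide_eq_true_eq,
      show (r ≤ (99:Int)) = True from by simp; omega,
      show ((100*q+r ≤ q*100+99)) = True from by simp; omega,
      show ((100*q+r ≤ (q+1)*100+99)) = True from by simp; omega, ite_true,
      PySem.List.min?_id_cons, List.foldl]
    omega
  · -- 20 ≤ q ≤ 48 : endings [99] at both levels
    simp only [show (100*q+r < 2000) = False from by simp; omega,
      show (100*q+r < 5000) = True from by simp; omega,
      show ((q+1)*100 < 2000) = False from by simp; omega,
      show ((q+1)*100 < 5000) = True from by simp; omega, ite_true, ite_false,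
      show PySem.List.sorted [(99:Int)] (fun x => x) false = [99] from by decide,
      roundLoopA, List.map, List.cons_append, List.nil_append,
      List.filter_cons, List.filter_nil, ge_iff_le, decide_eq_true_eq,
      show (r ≤ (99:Int)) = True from by simp; omega,
      show ((100*q+r ≤ q*100+99)) = True from by simp; omega,
      show ((100*q+r ≤ (q+1)*100+99)) = True from by simp; omega, ite_true,
      PySem.List.min?_id_cons, List.foldl]
    omega
  · -- q = 49 : endings [99], next level 5000 has [0,50,95,99]
    simp only [show (100*q+r < 2000) = False from by simp; omega,
      show (100*q+r < 5000) = True from by simp; omega,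
      show ((q+1)*100 < 2000) = False from by simp; omega,
      show ((q+1)*100 < 5000) = False from by simp; omega,
      show ((q+1)*100 < 10000) = True from by simp; omega, ite_true, ite_false,
      show PySem.List.sorted [(99:Int)] (fun x => x) false = [99] from by decide,
      roundLoopA, List.map, List.cons_append, List.nil_append,
      List.filter_cons, List.filter_nil, ge_iff_le, decide_eq_true_eq,
      show (r ≤ (99:Int)) = True from by simp; omega,
      show ((100*q+r ≤ q*100+99)) = True from by simp; omega,
      show ((100*q+r ≤ (q+1)*100+0)) = True from by simp; omega,
      show ((100*q+r ≤ (q+1)*100+50)) = True from by simp; omega,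
      show ((100*q+r ≤ (q+1)*100+95)) = True from by simp; omega,
      show ((100*q+r ≤ (q+1)*100+99)) = True from by simp; omega, ite_true,
      PySem.List.min?_id_cons, List.foldl]
    omega
  · -- 50 ≤ q ≤ 98 : endings [0,50,95,99] at both levels
    simp only [show (100*q+r < 2000) = False from by simp; omega,
      show (100*q+r < 5000) = False from by simp; omega,
      show (100*q+r < 10000) = True from by simp; omega,
      show ((q+1)*100 < 2000) = False from by simp; omega,
      show ((q+1)*100 < 5000) = False from by simp; omega,
      show ((q+1)*100 < 10000) = True from by simp; omega, ite_true, ite_false,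
      show PySem.List.sorted [(0:Int),50,95,99] (fun x => x) false = [0,50,95,99] from by decide,
      roundLoopA, List.map, List.cons_append, List.nil_append,
      List.filter_cons, List.filter_nil, ge_iff_le, decide_eq_true_eq,
      show ((100*q+r ≤ q*100+0)) = (r ≤ 0) from propext (by constructor <;> (intro; omega)),
      show ((100*q+r ≤ q*100+50)) = (r ≤ 50) from propext (by constructor <;> (intro; omega)),
      show ((100*q+r ≤ q*100+95)) = (r ≤ 95) from propext (by constructor <;> (intro; omega)),
      show ((100*q+r ≤ q*100+99)) = (r ≤ 99) from propext (by constructor <;> (intro; omega)),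
      show ((100*q+r ≤ (q+1)*100+0)) = True from by simp; omega,
      show ((100*q+r ≤ (q+1)*100+50)) = True from by simp; omega,
      show ((100*q+r ≤ (q+1)*100+95)) = True from by simp; omega,
      show ((100*q+r ≤ (q+1)*100+99)) = True from by simp; omega]
    split_ifs <;> simp only [PySem.List.min?_id_cons, List.foldl] <;> omega
  · -- q = 99 : endings [0,50,95,99], next level 10000 has [0,50]
    simp only [show (100*q+r < 2000) = False from by simp; omega,
      show (100*q+r < 5000) = False from by simp; omega,
      show (100*q+r < 10000) = True from by simp; omega,
      show ((q+1)*100 < 2000) = False from by simp; omega,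
      show ((q+1)*100 < 5000) = False from by simp; omega,
      show ((q+1)*100 < 10000) = False from by simp; omega, ite_true, ite_false,
      show PySem.List.sorted [(0:Int),50,95,99] (fun x => x) false = [0,50,95,99] from by decide,
      roundLoopA, List.map, List.cons_append, List.nil_append,
      List.filter_cons, List.filter_nil, ge_iff_le, decide_eq_true_eq,
      show ((100*q+r ≤ q*100+0)) = (r ≤ 0) from propext (by constructor <;> (intro; omega)),
      show ((100*q+r ≤ q*100+50)) = (r ≤ 50) from propext (by constructor <;> (intro; omega)),
      show ((100*q+r ≤ q*100+95)) = (r ≤ 95) from propext (by constructor <;> (intro; omega)),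
      show ((100*q+r ≤ q*100+99)) = (r ≤ 99) from propext (by constructor <;> (intro; omega)),
      show ((100*q+r ≤ (q+1)*100+0)) = True from by simp; omega,
      show ((100*q+r ≤ (q+1)*100+50)) = True from by simp; omega]
    split_ifs <;> simp only [PySem.List.min?_id_cons, List.foldl] <;> omega
  · -- 100 ≤ q : endings [0,50] at both levels; A may fall through to the bump branch
    simp only [show (100*q+r < 2000) = False from by simp; omega,
      show (100*q+r < 5000) = False from by simp; omega,
      show (100*q+r < 10000) = False from by simp; omega,
      show ((q+1)*100 < 2000) = False from by simp; omega,
      show ((q+1)*100 < 5000) = False from by simp; omega,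
      show ((q+1)*100 < 10000) = False from by simp; omega, ite_true, ite_false,
      show PySem.List.sorted [(0:Int),50] (fun x => x) false = [0,50] from by decide,
      show PySem.List.min? [(0:Int),50] (fun x => x) = some 0 from by decide,
      roundLoopA, List.map, List.cons_append, List.nil_append,
      List.filter_cons, List.filter_nil, ge_iff_le, decide_eq_true_eq,
      show ((100*q+r ≤ q*100+0)) = (r ≤ 0) from propext (by constructor <;> (intro; omega)),
      show ((100*q+r ≤ q*100+50)) = (r ≤ 50) from propext (by constructor <;> (intro; omega)),
      show ((100*q+r ≤ (q+1)*100+0)) = True from by simp; omega,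
      show ((100*q+r ≤ (q+1)*100+50)) = True from by simp; omega]
    split_ifs <;> simp only [PySem.List.min?_id_cons, List.foldl] <;> omega

theorem round_to_engagement_py_spec : Claim_equal_round_to_engagement_py := by
  intro p _
  unfold Spec_round_to_engagement_py
  obtain ⟨q, rr, hr0, hr1, rfl⟩ : ∃ q rr, 0 ≤ rr ∧ rr < 100 ∧ p = 100*q+rr :=
    ⟨p / 100, p % 100, by omega, by omega, by omega⟩
  exact regions_eq q rr hr0 hr1
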